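-- pv_equiv track=rewrite | github.com/EddieASC21/Scalper-Bot-Data-Gathering | #APP Scalper Bot Data Gathering.py | splitServed
-- ===== SOURCE A (Python) =====
-- def splitServed(served):
--     amountServed = [0,0]
--     for i in range(len(served)):
--         if served[i][5] == "bots":
--             amountServed[0] += served[i][4]
--         if served[i][5] == "human":
--             amountServed[1] += served[i][4]
--         if served[i][5] == "autofill":
--             amountServed[1] += served[i][4]
--     return amountServed
-- ===== SOURCE B (Python) =====
-- def splitServed(served):
--     return [
--         sum(r[4] for r in served if r[5] == "bots"),
--         sum(r[4] for r in served if r[5] in ("human", "autofill")),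
--     ]
-- ===== Notes on version B (the rewrite author's own statement) =====
-- stated objective: simpler
-- what changed: Replaced the single index-based loop mutating a two-slot list with three separate if-branches by two independent filtered sums, one per bucket, returned directly as a two-element list.
import Mathlib
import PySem

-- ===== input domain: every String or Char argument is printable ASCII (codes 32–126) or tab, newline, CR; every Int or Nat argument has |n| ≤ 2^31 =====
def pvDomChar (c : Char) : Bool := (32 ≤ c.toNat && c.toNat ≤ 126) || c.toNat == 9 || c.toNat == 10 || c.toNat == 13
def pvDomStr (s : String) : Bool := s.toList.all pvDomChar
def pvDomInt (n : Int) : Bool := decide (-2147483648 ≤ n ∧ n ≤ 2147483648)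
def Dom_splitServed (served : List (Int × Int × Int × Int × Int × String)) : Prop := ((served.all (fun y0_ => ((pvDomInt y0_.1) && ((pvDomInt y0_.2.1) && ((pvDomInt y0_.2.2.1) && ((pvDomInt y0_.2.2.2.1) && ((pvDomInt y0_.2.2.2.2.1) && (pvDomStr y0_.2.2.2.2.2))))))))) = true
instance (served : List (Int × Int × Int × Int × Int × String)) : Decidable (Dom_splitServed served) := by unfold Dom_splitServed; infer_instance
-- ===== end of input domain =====

-- B computes the two buckets with two independent filtered sums instead of A's single index loop mutating a two-slot list (objective: simpler).
-- ===== PORT A =====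
-- Port of A: index loop over range(len(served)) mutating the two-slot accumulator
def splitServedLoop (served : List (Int × Int × Int × Int × Int × String)) : List Int → Int → List Int
  | acc, i =>
    let acc :=
      match PySem.List.pyGet? served i with
      | some r =>
        let acc := if r.2.2.2.2.2 == "bots" then [acc.getD 0 0 + r.2.2.2.2.1, acc.getD 1 0] else acc
        let acc := if r.2.2.2.2.2 == "human" then [acc.getD 0 0, acc.getD 1 0 + r.2.2.2.2.1] else acc
        if r.2.2.2.2.2 == "autofill" then [acc.getD 0 0, acc.getD 1 0 + r.2.2.2.2.1] else acc
      | none => acc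
    acc

def splitServed (served : List (Int × Int × Int × Int × Int × String)) : List Int :=
  (PySem.List.pyRange 0 served.length 1).foldl (splitServedLoop served) [0, 0]

-- ===== PORT B =====
-- Port of B: two independent filtered sums, one per bucket
def splitServed_alt (served : List (Int × Int × Int × Int × Int × String)) : List Int :=
  [ ((served.filter (fun r => r.2.2.2.2.2 == "bots")).map (fun r => r.2.2.2.2.1)).sum,
    ((served.filter (fun r => r.2.2.2.2.2 == "human" || r.2.2.2.2.2 == "autofill")).map
      (fun r => r.2.2.2.2.1)).sum ]

-- ===== PRECONDITION & SPEC =====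
def Spec_splitServed (served : List (Int × Int × Int × Int × Int × String)) (out : List Int) : Prop := out = splitServed_alt served
instance (served : List (Int × Int × Int × Int × Int × String)) (out : List Int) : Decidable (Spec_splitServed served out) := by unfold Spec_splitServed; infer_instance

-- ===== CLAIM (what is proved, stated in full; the proofs are below) =====
def Claim_equal_splitServed : Prop := ∀ (served : List (Int × Int × Int × Int × Int × String)), Dom_splitServed served → Spec_splitServed served (splitServed served)

-- ===== LEMMAS AND PROOFS =====

def S0 (xs : List (Int × Int × Int × Int × Int × String)) : Int :=
  ((xs.filter (fun r => r.2.2.2.2.2 == "bots")).map (fun r => r.2.2.2.2.1)).sum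

def S1 (xs : List (Int × Int × Int × Int × Int × String)) : Int :=
  ((xs.filter (fun r => r.2.2.2.2.2 == "human" || r.2.2.2.2.2 == "autofill")).map
    (fun r => r.2.2.2.2.1)).sum

theorem loop_inv (xs : List (Int × Int × Int × Int × Int × String)) (k : Nat) (b h : Int) :
    (PySem.List.pyRange (k : Int) (xs.length : Int) 1).foldl (splitServedLoop xs) [b, h]
      = [b + S0 (xs.drop k), h + S1 (xs.drop k)] := by
  by_cases hk : k < xs.length
  · have hlt : (k : Int) < (xs.length : Int) := by exact_mod_cast hk
    rw [PySem.List.pyRange_one_cons hlt]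
    have hget : PySem.List.pyGet? xs (k : Int) = some xs[k] :=
      PySem.List.pyGet?_ofNat xs k hk
    have hdrop : xs.drop k = xs[k] :: xs.drop (k + 1) := List.drop_eq_getElem_cons hk
    have ih : ∀ (b h : Int),
        (PySem.List.pyRange ((k : Int) + 1) (xs.length : Int) 1).foldl
          (splitServedLoop xs) [b, h]
          = [b + S0 (xs.drop (k + 1)), h + S1 (xs.drop (k + 1))] := by
      intro b h
      have := loop_inv xs (k + 1) b h
      rwa [show ((k + 1 : Nat) : Int) = (k : Int) + 1 by push_cast; ring] at this
    rcases hx : xs[k] with ⟨a1, a2, a3, a4, v, str⟩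
    cases h1 : (str == "bots") <;> cases h2 : (str == "human") <;>
      cases h3 : (str == "autofill") <;>
    first
    | exact absurd ((beq_iff_eq.mp h1).symm.trans (beq_iff_eq.mp h2)) (by decide)
    | exact absurd ((beq_iff_eq.mp h1).symm.trans (beq_iff_eq.mp h3)) (by decide)
    | exact absurd ((beq_iff_eq.mp h2).symm.trans (beq_iff_eq.mp h3)) (by decide)
    | (simp only [List.foldl_cons, splitServedLoop, hget, hx, h1, h2, h3,
         Bool.false_eq_true, if_true, if_false, List.getD,
         List.getElem?_cons_zero, List.getElem?_cons_succ, Option.getD_some]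
       rw [ih, hdrop, hx]
       simp [S0, S1, h1, h2, h3]
       try ring)
  · have hle : (xs.length : Int) ≤ (k : Int) := by omega
    rw [PySem.List.pyRange_one_eq_nil hle, List.drop_eq_nil_of_le (by omega)]
    simp [S0, S1]
  termination_by xs.length - k

-- ===== VERDICT (by name: the statement is the Claim_ definition above) =====
theorem splitServed_spec : Claim_equal_splitServed := by
  intro served _
  show splitServed served = splitServed_alt served
  have h := loop_inv served 0 0 0
  simpa [splitServed, splitServed_alt, S0, S1] using h
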